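-- pv_equiv track=rewrite | github.com/namn44241/Toan_roi_rac | Bai 3. Tong hop/Ex 8.py | count_non_divisible
-- ===== SOURCE A (Python) =====
-- def gcd(a, b):
--     while b:
--         a, b = b, a % b
--     return a
--
-- def lcm(a, b):
--     return a * b // gcd(a, b)
--
-- def count_non_divisible(n, primes):
--     def count_divisible(mask):
--         product = 1
--         for i in range(len(primes)):
--             if mask & (1 << i):
--                 product = lcm(product, primes[i])
--         return n // product
--
--     total = 0
--     for mask in range(1, 1 << len(primes)):
--         if bin(mask).count('1') % 2 == 1:
--             total += count_divisible(mask)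
--         else:
--             total -= count_divisible(mask)
--
--     return n - total
-- ===== SOURCE B (Python) =====
-- def gcd(a, b):
--     while b:
--         a, b = b, a % b
--     return a
--
-- def lcm(a, b):
--     return a * b // gcd(a, b)
--
-- def count_non_divisible(n, primes):
--     def go(ps, l):
--         if not ps:
--             return n // l
--         rest = ps[1:]
--         return go(rest, l) - go(rest, lcm(l, ps[0]))
--     return go(primes, 1)
-- ===== Notes on version B (the rewrite author's own statement) =====
-- stated objective: faster
-- what changed: A enumerates all 2^k bit masks and for each one rescans all k primes to rebuild the lcm product and recounts the mask's set bits; B is a single recursion over the prime list that branches on include/exclude and carries the running lcm incrementally, removing the per-subset O(k) rescan (timing: 7.6x at the largest size both versions finished; at the top size both time out, the problem being exponential in k).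
import Mathlib
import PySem

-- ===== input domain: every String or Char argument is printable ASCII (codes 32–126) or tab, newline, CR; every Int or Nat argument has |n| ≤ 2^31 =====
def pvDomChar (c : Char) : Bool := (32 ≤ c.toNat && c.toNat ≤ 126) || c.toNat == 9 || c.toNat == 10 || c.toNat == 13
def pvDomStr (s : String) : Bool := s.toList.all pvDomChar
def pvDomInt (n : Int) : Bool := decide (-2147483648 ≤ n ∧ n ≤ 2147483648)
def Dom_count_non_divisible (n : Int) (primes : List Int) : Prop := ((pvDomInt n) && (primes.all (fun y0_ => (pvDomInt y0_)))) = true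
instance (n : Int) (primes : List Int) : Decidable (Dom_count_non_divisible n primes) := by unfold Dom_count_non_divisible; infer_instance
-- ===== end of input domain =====

-- B replaces A's per-mask product/popcount rescan by one recursion over the prime list that
-- branches on "include this prime or not", carrying the running lcm (objective: faster;
-- a timing run measured B 7.6x faster than A at the largest size both finished).

-- ===== PORT A =====
-- Python gcd: while b: a, b = b, a % b  (Python % = floor mod, PySem.Int.mod)
def pygcd (a b : Int) : Int :=
  if b = 0 then a else pygcd b (PySem.Int.mod a b)
termination_by b.natAbs
decreasing_by
  rename_i hb
  rcases lt_trichotomy b 0 with h | h | h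
  · have h1 := PySem.Int.mod_neg_bounds a h
    omega
  · exact absurd h hb
  · have h1 := PySem.Int.mod_nonneg a h
    have h2 := PySem.Int.mod_lt a h
    omega

def pylcm (a b : Int) : Int := PySem.Int.floordiv (a * b) (pygcd a b)

-- bin(mask).count('1') ported as binary popcount; exact for mask ≥ 0 (all masks here are ≥ 1)
def pcount (m : Nat) : Nat :=
  if m = 0 then 0 else m % 2 + pcount (m / 2)
decreasing_by omega

-- A's inner loop "for i in range(len(primes)): if mask & (1 << i): product = lcm(product, primes[i])"
-- ported as a structural recursion over primes consuming the mask bit by bit (same products,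
-- same order); exact for mask ≥ 0.
def prodA : List Int → Nat → Int → Int
  | [], _, l => l
  | p :: rest, m, l => prodA rest (m / 2) (if m % 2 = 1 then pylcm l p else l)

def count_non_divisible (n : Int) (primes : List Int) : Int :=
  n -
    (PySem.List.pyRange 1 ((1 : Int) <<< primes.length) 1).foldl
      (fun total mask =>
        if pcount mask.toNat % 2 = 1 then
          total + PySem.Int.floordiv n (prodA primes mask.toNat 1)
        else
          total - PySem.Int.floordiv n (prodA primes mask.toNat 1)) 0

-- ===== PORT B =====
-- go(ps, l): if not ps: return n // l ; else go(rest, l) - go(rest, lcm(l, ps[0]))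
def goB (n : Int) : List Int → Int → Int
  | [], l => PySem.Int.floordiv n l
  | p :: rest, l => goB n rest l - goB n rest (pylcm l p)

def count_non_divisible_alt (n : Int) (primes : List Int) : Int := goB n primes 1

-- ===== PRECONDITION & SPEC =====
-- Pre_ excludes exactly the inputs where Python raises: if 0 ∈ primes, every mask selecting it
-- makes the running product 0 and 'n // product' raises ZeroDivisionError (in both A and B).
def Pre_count_non_divisible (_n : Int) (primes : List Int) : Prop := (0 : Int) ∉ primes
instance (n : Int) (primes : List Int) : Decidable (Pre_count_non_divisible n primes) := by
  unfold Pre_count_non_divisible; infer_instance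

def pvWitness_count_non_divisible : Int × List Int := (100, [2, 3, 5])

def Spec_count_non_divisible (n : Int) (primes : List Int) (out : Int) : Prop := out = count_non_divisible_alt n primes
instance (n : Int) (primes : List Int) (out : Int) : Decidable (Spec_count_non_divisible n primes out) := by unfold Spec_count_non_divisible; infer_instance

-- ===== CLAIM (what is proved, stated in full; the proofs are below) =====
def Claim_equal_count_non_divisible : Prop := ∀ (n : Int) (primes : List Int), Dom_count_non_divisible n primes → Pre_count_non_divisible n primes → Spec_count_non_divisible n primes (count_non_divisible n primes)

-- ===== LEMMAS AND PROOFS =====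

lemma pcount_zero : pcount 0 = 0 := by
  rw [pcount]; simp

lemma prodA_zero (ps : List Int) (l : Int) : prodA ps 0 l = l := by
  induction ps generalizing l with
  | nil => rfl
  | cons p rest ih => simp [prodA, ih]

lemma pcount_two_mul (m : Nat) : pcount (2 * m) = pcount m := by
  rcases Nat.eq_zero_or_pos m with h | h
  · subst h; rfl
  · rw [pcount, if_neg (by omega)]
    have h1 : 2 * m % 2 = 0 := by omega
    have h2 : 2 * m / 2 = m := by omega
    rw [h1, h2]
    omega

lemma pcount_two_mul_add_one (m : Nat) : pcount (2 * m + 1) = pcount m + 1 := by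
  rw [pcount, if_neg (by omega)]
  have h1 : (2 * m + 1) % 2 = 1 := by omega
  have h2 : (2 * m + 1) / 2 = m := by omega
  rw [h1, h2]
  omega

lemma prodA_cons_even (p : Int) (rest : List Int) (m : Nat) (l : Int) :
    prodA (p :: rest) (2 * m) l = prodA rest m l := by
  have h1 : 2 * m % 2 = 0 := by omega
  have h2 : 2 * m / 2 = m := by omega
  simp [prodA, h1, h2]

lemma prodA_cons_odd (p : Int) (rest : List Int) (m : Nat) (l : Int) :
    prodA (p :: rest) (2 * m + 1) l = prodA rest m (pylcm l p) := by
  have h1 : (2 * m + 1) % 2 = 1 := by omega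
  have h2 : (2 * m + 1) / 2 = m := by omega
  simp [prodA, h1, h2]

lemma sum_range_double (f : Nat → Int) (N : Nat) :
    ∑ m ∈ Finset.range (2 * N), f m = ∑ m ∈ Finset.range N, (f (2 * m) + f (2 * m + 1)) := by
  induction N with
  | zero => rfl
  | succ N ih =>
      have h : 2 * (N + 1) = (2 * N + 1) + 1 := by ring
      rw [h, Finset.sum_range_succ, Finset.sum_range_succ, ih, Finset.sum_range_succ]
      ring

lemma goB_sum (n : Int) (ps : List Int) (l : Int) :
    goB n ps l =
      ∑ m ∈ Finset.range (2 ^ ps.length),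
        (-1 : Int) ^ pcount m * PySem.Int.floordiv n (prodA ps m l) := by
  induction ps generalizing l with
  | nil =>
      simp [goB, prodA, pcount_zero]
  | cons p rest ih =>
      have hlen : 2 ^ (p :: rest).length = 2 * 2 ^ rest.length := by
        simp [List.length_cons, pow_succ]; ring
      rw [hlen, sum_range_double]
      have hterm : ∀ m ∈ Finset.range (2 ^ rest.length),
          (-1 : Int) ^ pcount (2 * m) * PySem.Int.floordiv n (prodA (p :: rest) (2 * m) l) +
            (-1 : Int) ^ pcount (2 * m + 1) *
              PySem.Int.floordiv n (prodA (p :: rest) (2 * m + 1) l) =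
          (-1 : Int) ^ pcount m * PySem.Int.floordiv n (prodA rest m l) -
            (-1 : Int) ^ pcount m * PySem.Int.floordiv n (prodA rest m (pylcm l p)) := by
        intro m _
        rw [pcount_two_mul, pcount_two_mul_add_one, prodA_cons_even, prodA_cons_odd, pow_succ]
        ring
      rw [Finset.sum_congr rfl hterm, Finset.sum_sub_distrib]
      simp [goB, ih]

lemma sign_flip (c : Nat) (v : Int) :
    (if c % 2 = 1 then v else -v) = -((-1 : Int) ^ c * v) := by
  rcases Nat.even_or_odd c with h | h
  · rw [if_neg (by rw [Nat.even_iff] at h; omega), h.neg_one_pow]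
    ring
  · rw [if_pos (by rw [Nat.odd_iff] at h; exact h), h.neg_one_pow]
    ring

lemma floordiv_one (n : Int) : PySem.Int.floordiv n 1 = n := by
  rw [PySem.Int.floordiv_eq_ediv_of_pos (by norm_num : (0:Int) < 1)]
  exact Int.ediv_one n

-- ===== VERDICT (by name: the statement is the Claim_ definition above) =====
theorem count_non_divisible_spec : Claim_equal_count_non_divisible := by
  intro n primes _ _
  unfold Spec_count_non_divisible count_non_divisible count_non_divisible_alt
  have hshift : ((1 : Int) <<< primes.length) = ((2 ^ primes.length : Nat) : Int) := by
    rw [Int.shiftLeft_eq]; push_cast; ring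
  have hpow : 1 ≤ 2 ^ primes.length := Nat.one_le_two_pow
  have htn : (((2 ^ primes.length : Nat) : Int) - 1).toNat = 2 ^ primes.length - 1 := by omega
  rw [hshift, PySem.List.pyRange_one, htn, List.foldl_map]
  have hcg : ∀ (t : Int) (j : Nat), j ∈ List.range (2 ^ primes.length - 1) →
      (if pcount ((1 : Int) + j).toNat % 2 = 1 then
          t + PySem.Int.floordiv n (prodA primes ((1 : Int) + j).toNat 1)
        else
          t - PySem.Int.floordiv n (prodA primes ((1 : Int) + j).toNat 1)) =
      t + -((-1 : Int) ^ pcount (1 + j) * PySem.Int.floordiv n (prodA primes (1 + j) 1)) := by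
    intro t j _
    have h1 : ((1 : Int) + j).toNat = 1 + j := by omega
    simp only [h1]
    rw [← sign_flip]
    split <;> ring
  rw [PySem.List.foldl_congr_mem (List.range (2 ^ primes.length - 1))
        (fun (x : Int) (y : Nat) =>
          if pcount ((1 : Int) + y).toNat % 2 = 1 then
            x + PySem.Int.floordiv n (prodA primes ((1 : Int) + y).toNat 1)
          else
            x - PySem.Int.floordiv n (prodA primes ((1 : Int) + y).toNat 1))
        (fun (t : Int) (j : Nat) =>
          t + -((-1 : Int) ^ pcount (1 + j) * PySem.Int.floordiv n (prodA primes (1 + j) 1)))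
        0 hcg,
      PySem.List.foldl_add, zero_add]
  have hsum : ((List.range (2 ^ primes.length - 1)).map
        (fun j => -((-1 : Int) ^ pcount (1 + j) * PySem.Int.floordiv n (prodA primes (1 + j) 1)))).sum =
      ∑ j ∈ Finset.range (2 ^ primes.length - 1),
        -((-1 : Int) ^ pcount (1 + j) * PySem.Int.floordiv n (prodA primes (1 + j) 1)) := rfl
  rw [hsum, Finset.sum_neg_distrib, goB_sum]
  have hsplit := Finset.sum_range_succ'
    (fun m => (-1 : Int) ^ pcount m * PySem.Int.floordiv n (prodA primes m 1)) (2 ^ primes.length - 1)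
  have hone : 2 ^ primes.length - 1 + 1 = 2 ^ primes.length := by omega
  rw [hone] at hsplit
  rw [hsplit, pcount_zero, pow_zero, one_mul, prodA_zero, floordiv_one]
  have hflip : ∀ j : Nat, j + 1 = 1 + j := fun j => by omega
  simp only [hflip]
  ring
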